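-- pv_equiv track=rewrite | github.com/mondrasovic/competitive_programming | UVA/861_Little_Bishops/main.py | get_attack_bitmasks
-- ===== SOURCE A (Python) =====
-- def get_attack_bitmasks(board_size):
--     coord_modifs = ((-1, -1), (-1, 1), (1, -1), (1, 1))
--     attack_bitmasks = []
--
--     for row in range(board_size):
--         for col in range(board_size):
--             attack_bitmask = 0
--
--             for row_delta, col_delta in coord_modifs:
--                 curr_row, curr_col = row, col
--
--                 while (
--                     (0 <= curr_row < board_size) and
--                     (0 <= curr_col < board_size)
--                 ):
--                     curr_pos = (curr_row * board_size) + curr_col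
--                     attack_bitmask |= 1 << curr_pos
--
--                     curr_row += row_delta
--                     curr_col += col_delta
--
--             attack_bitmasks.append(attack_bitmask)
--
--     return attack_bitmasks
-- ===== SOURCE B (Python) =====
-- def get_attack_bitmasks(board_size):
--     diag = {}
--     anti = {}
--     for row in range(board_size):
--         for col in range(board_size):
--             bit = 1 << (row * board_size + col)
--             diag[row + col] = diag.get(row + col, 0) | bit
--             anti[row - col] = anti.get(row - col, 0) | bit
--     return [
--         diag[row + col] | anti[row - col]
--         for row in range(board_size)
--         for col in range(board_size)
--     ]
-- ===== Notes on version B (the rewrite author's own statement) =====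
-- stated objective: faster
-- what changed: Instead of walking four rays per cell with while loops, B builds the full bitmask of every diagonal and anti-diagonal once in a single pass over the grid, then each cell's mask is just the OR of its two precomputed diagonal masks.
import Mathlib
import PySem

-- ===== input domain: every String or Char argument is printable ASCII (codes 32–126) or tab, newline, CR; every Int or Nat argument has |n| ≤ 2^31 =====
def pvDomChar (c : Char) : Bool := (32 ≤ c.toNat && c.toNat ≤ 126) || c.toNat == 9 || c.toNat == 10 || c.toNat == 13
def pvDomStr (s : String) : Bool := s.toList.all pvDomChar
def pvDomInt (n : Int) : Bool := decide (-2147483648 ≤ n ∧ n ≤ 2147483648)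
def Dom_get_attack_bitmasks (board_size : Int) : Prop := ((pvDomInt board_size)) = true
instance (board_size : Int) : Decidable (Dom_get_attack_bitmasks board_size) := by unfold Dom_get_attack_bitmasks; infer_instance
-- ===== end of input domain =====

-- B replaces A's four per-cell while-loop ray walks (O(n^3) cell visits) by one pass that precomputes the
-- full bitmask of every diagonal and anti-diagonal in two dicts, each cell's mask being the OR of its two
-- diagonal masks (objective: faster, asymptotic; return value only, no mutation involved).

-- ===== PORT A =====
-- the while loop: moves (row, col) by (dr, dc) = (±1, ±1) while on the board, OR-ing in 1 << (row*n+col).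
-- Fuel n.toNat is enough: each iteration moves row by ±1 inside [0, n), so the loop runs at most n times.
-- Inside the loop 0 ≤ r, 0 ≤ c and 0 < n, so the position r*n+c is nonnegative and .toNat is exact.
def pvWalk (n dr dc : Int) : Nat → Int → Int → Int → Int
  | 0, _, _, acc => acc
  | fuel+1, r, c, acc =>
    if 0 ≤ r ∧ r < n ∧ 0 ≤ c ∧ c < n then
      pvWalk n dr dc fuel (r + dr) (c + dc)
        (PySem.Int.bor acc ((1 : Int) <<< ((r * n + c).toNat)))
    else acc

-- the body of the two inner for-loops: fold of the four ray walks over coord_modifs, acc starts at 0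
def pvCellA (n r c : Int) : Int :=
  [((-1 : Int), (-1 : Int)), (-1, 1), (1, -1), (1, 1)].foldl
    (fun acc dd => pvWalk n dd.1 dd.2 n.toNat r c acc) 0

def get_attack_bitmasks (board_size : Int) : List Int :=
  (PySem.List.pyRange 0 board_size 1).foldl (fun acc row =>
    (PySem.List.pyRange 0 board_size 1).foldl (fun acc col =>
      acc ++ [pvCellA board_size row col]) acc) []

-- ===== PORT B =====
-- the two dict-building for-loops of Source B: state is the pair (diag, anti)
def pvBuild (n : Int) : PySem.Dict Int Int × PySem.Dict Int Int :=
  (PySem.List.pyRange 0 n 1).foldl (fun st row =>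
    (PySem.List.pyRange 0 n 1).foldl (fun st col =>
      let bit : Int := (1 : Int) <<< ((row * n + col).toNat)
      (st.1.insert (row + col) (PySem.Int.bor (st.1.getD (row + col) 0) bit),
       st.2.insert (row - col) (PySem.Int.bor (st.2.getD (row - col) 0) bit))) st)
    (PySem.Dict.empty, PySem.Dict.empty)

-- diag[row+col] / anti[row-col]: the key was inserted for this very (row, col) in the build pass,
-- so the lookup never raises and getD _ 0 is exact.
def get_attack_bitmasks_alt (board_size : Int) : List Int :=
  let st := pvBuild board_size
  (PySem.List.pyRange 0 board_size 1).flatMap (fun row =>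
    (PySem.List.pyRange 0 board_size 1).map (fun col =>
      PySem.Int.bor (st.1.getD (row + col) 0) (st.2.getD (row - col) 0)))

-- ===== PRECONDITION & SPEC =====
def Spec_get_attack_bitmasks (board_size : Int) (out : List Int) : Prop := out = get_attack_bitmasks_alt board_size
instance (board_size : Int) (out : List Int) : Decidable (Spec_get_attack_bitmasks board_size out) := by unfold Spec_get_attack_bitmasks; infer_instance

-- ===== CLAIM (what is proved, stated in full; the proofs are below) =====
def Claim_equal_get_attack_bitmasks : Prop := ∀ (board_size : Int), Dom_get_attack_bitmasks board_size → Spec_get_attack_bitmasks board_size (get_attack_bitmasks board_size)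

-- ===== LEMMAS AND PROOFS =====

-- positions (as Nats) visited by one ray walk, mirroring pvWalk
def pvRay (n dr dc : Int) : Nat → Int → Int → List Nat
  | 0, _, _ => []
  | fuel+1, r, c =>
    if 0 ≤ r ∧ r < n ∧ 0 ≤ c ∧ c < n then
      ((r * n + c).toNat) :: pvRay n dr dc fuel (r + dr) (c + dc)
    else []

-- all positions visited for one cell (the four rays, in coord_modifs order)
def pvRayAll (n r c : Int) : List Nat :=
  pvRay n (-1) (-1) n.toNat r c ++ pvRay n (-1) 1 n.toNat r c ++
  pvRay n 1 (-1) n.toNat r c ++ pvRay n 1 1 n.toNat r c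

-- OR of the bits 1 <<< p over a list of positions, in Nat
def pvOB (l : List Nat) : Nat := l.foldl (fun a p => a ||| (1 <<< p)) 0

-- the grid as a flat list of cells
def pvCells (n : Int) : List (Int × Int) :=
  (PySem.List.pyRange 0 n 1).flatMap (fun r => (PySem.List.pyRange 0 n 1).map (fun c => (r, c)))

lemma pvShift_cast (k : Nat) : (1 : Int) <<< k = (((1 <<< k : Nat)) : Int) := by
  simp [Int.shiftLeft_eq, Nat.shiftLeft_eq]

lemma pvFoldl_bor_shift {α : Type} (px : α → Nat) (l : List α) (a : Nat) :
    l.foldl (fun x y => PySem.Int.bor x ((1 : Int) <<< px y)) (a : Int)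
      = ((l.foldl (fun x y => x ||| (1 <<< px y)) a : Nat) : Int) := by
  induction l generalizing a with
  | nil => rfl
  | cons y t ih =>
      simp only [List.foldl_cons, pvShift_cast, PySem.Int.bor_natCast]
      exact ih _

lemma pvOB_foldl (l : List Nat) (a : Nat) :
    l.foldl (fun x p => x ||| (1 <<< p)) a = a ||| pvOB l := by
  induction l generalizing a with
  | nil => simp [pvOB]
  | cons p t ih =>
      simp only [pvOB, List.foldl_cons]
      rw [ih (a ||| 1 <<< p), ih (0 ||| 1 <<< p)]
      simp [Nat.lor_assoc]

lemma pvOB_cons (p : Nat) (t : List Nat) : pvOB (p :: t) = (1 <<< p) ||| pvOB t := by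
  simp only [pvOB, List.foldl_cons]
  rw [pvOB_foldl]
  simp [pvOB]

lemma pvOB_append (l1 l2 : List Nat) : pvOB (l1 ++ l2) = pvOB l1 ||| pvOB l2 := by
  simp only [pvOB, List.foldl_append]
  rw [pvOB_foldl]
  rfl

lemma pvOB_absorb {p : Nat} {l : List Nat} (h : p ∈ l) :
    (1 <<< p) ||| pvOB l = pvOB l := by
  induction l with
  | nil => cases h
  | cons q t ih =>
      rw [pvOB_cons]
      rcases List.mem_cons.mp h with rfl | hmem
      · rw [← Nat.lor_assoc]
        simp
      · rw [← Nat.lor_assoc, Nat.lor_comm (1 <<< p) (1 <<< q), Nat.lor_assoc, ih hmem]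

lemma pvOB_subset {l1 l2 : List Nat} (h : ∀ p ∈ l1, p ∈ l2) :
    pvOB l2 ||| pvOB l1 = pvOB l2 := by
  induction l1 with
  | nil => simp [pvOB]
  | cons p t ih =>
      rw [pvOB_cons, ← Nat.lor_assoc, Nat.lor_comm (pvOB l2) (1 <<< p), Nat.lor_assoc,
        ih (fun q hq => h q (List.mem_cons_of_mem _ hq)),
        pvOB_absorb (h p List.mem_cons_self)]

lemma pvOB_ext {l1 l2 : List Nat} (h : ∀ p, p ∈ l1 ↔ p ∈ l2) : pvOB l1 = pvOB l2 := by
  have h1 := pvOB_subset (l1 := l1) (l2 := l2) (fun p hp => (h p).mp hp)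
  have h2 := pvOB_subset (l1 := l2) (l2 := l1) (fun p hp => (h p).mpr hp)
  rw [← h1, Nat.lor_comm, h2]

lemma pvWalk_eq_ray (n dr dc : Int) (fuel : Nat) :
    ∀ (r c acc : Int), pvWalk n dr dc fuel r c acc
      = (pvRay n dr dc fuel r c).foldl (fun a (p : Nat) => PySem.Int.bor a ((1 : Int) <<< p)) acc := by
  induction fuel with
  | zero => intro r c acc; rfl
  | succ fuel ih =>
      intro r c acc
      rw [pvWalk, pvRay]
      split_ifs with h
      · rw [ih]; rfl
      · rfl

lemma pvRay_nil {n dr dc r c : Int} (fuel : Nat)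
    (h : ¬(0 ≤ r ∧ r < n ∧ 0 ≤ c ∧ c < n)) : pvRay n dr dc fuel r c = [] := by
  cases fuel <;> simp [pvRay, h]

lemma pvStep_mono {n dr dc : Int} (hdr : dr = 1 ∨ dr = -1) (hdc : dc = 1 ∨ dc = -1)
    {r c : Int} {s t : Nat}
    (h0 : 0 ≤ r ∧ r < n ∧ 0 ≤ c ∧ c < n)
    (ht : 0 ≤ r + t * dr ∧ r + t * dr < n ∧ 0 ≤ c + t * dc ∧ c + t * dc < n)
    (hst : s ≤ t) :
    0 ≤ r + s * dr ∧ r + s * dr < n ∧ 0 ≤ c + s * dc ∧ c + s * dc < n := by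
  rcases hdr with rfl | rfl <;> rcases hdc with rfl | rfl <;>
    simp only [mul_one, mul_neg_one] at ht ⊢ <;> omega

lemma pvRay_mem (n dr dc : Int) (hdr : dr = 1 ∨ dr = -1) (hdc : dc = 1 ∨ dc = -1)
    (p : Nat) (fuel : Nat) :
    ∀ (r c : Int), (0 ≤ r ∧ r < n ∧ 0 ≤ c ∧ c < n) →
      (∀ t : Nat, (0 ≤ r + t * dr ∧ r + t * dr < n ∧ 0 ≤ c + t * dc ∧ c + t * dc < n) → t < fuel) →
      (p ∈ pvRay n dr dc fuel r c ↔
        ∃ t : Nat, (0 ≤ r + t * dr ∧ r + t * dr < n ∧ 0 ≤ c + t * dc ∧ c + t * dc < n) ∧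
          p = ((r + t * dr) * n + (c + t * dc)).toNat) := by
  induction fuel with
  | zero =>
      intro r c h0 hf
      exact absurd (hf 0 (by simpa using h0)) (by omega)
  | succ fuel ih =>
      intro r c h0 hf
      rw [pvRay, if_pos h0]
      simp only [List.mem_cons]
      constructor
      · rintro (hp | hp)
        · exact ⟨0, by simpa using h0, by simpa using hp⟩
        · by_cases h1 : 0 ≤ r + dr ∧ r + dr < n ∧ 0 ≤ c + dc ∧ c + dc < n
          · obtain ⟨t, ht, hpt⟩ := (ih (r + dr) (c + dc) h1 (fun t htt => by
              have e1 : r + dr + (t : Int) * dr = r + ((t + 1 : Nat) : Int) * dr := by push_cast; ring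
              have e2 : c + dc + (t : Int) * dc = c + ((t + 1 : Nat) : Int) * dc := by push_cast; ring
              rw [e1, e2] at htt
              have := hf (t + 1) htt
              omega)).mp hp
            refine ⟨t + 1, ?_, ?_⟩ <;>
              · have e1 : r + ((t + 1 : Nat) : Int) * dr = r + dr + (t : Int) * dr := by push_cast; ring
                have e2 : c + ((t + 1 : Nat) : Int) * dc = c + dc + (t : Int) * dc := by push_cast; ring
                rw [e1, e2]
                assumption
          · rw [pvRay_nil fuel h1] at hp
            cases hp
      · rintro ⟨t, ht, hpt⟩
        cases t with
        | zero =>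
            left
            simpa using hpt
        | succ s =>
            right
            have h1 : 0 ≤ r + dr ∧ r + dr < n ∧ 0 ≤ c + dc ∧ c + dc < n := by
              have := pvStep_mono hdr hdc h0 ht (s := 1) (by omega)
              simpa using this
            apply (ih (r + dr) (c + dc) h1 (fun u huu => by
              have e1 : r + dr + (u : Int) * dr = r + ((u + 1 : Nat) : Int) * dr := by push_cast; ring
              have e2 : c + dc + (u : Int) * dc = c + ((u + 1 : Nat) : Int) * dc := by push_cast; ring
              rw [e1, e2] at huu
              have := hf (u + 1) huu
              omega)).mpr
            refine ⟨s, ?_, ?_⟩ <;>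
              · have e1 : r + dr + (s : Int) * dr = r + ((s + 1 : Nat) : Int) * dr := by push_cast; ring
                have e2 : c + dc + (s : Int) * dc = c + ((s + 1 : Nat) : Int) * dc := by push_cast; ring
                rw [e1, e2]
                assumption

lemma pvFuel_bound {n dr dc r c : Int} (hdr : dr = 1 ∨ dr = -1) (hdc : dc = 1 ∨ dc = -1)
    (h0 : 0 ≤ r ∧ r < n ∧ 0 ≤ c ∧ c < n) :
    ∀ t : Nat, (0 ≤ r + t * dr ∧ r + t * dr < n ∧ 0 ≤ c + t * dc ∧ c + t * dc < n) → t < n.toNat := by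
  rcases hdr with rfl | rfl <;> rcases hdc with rfl | rfl <;> intro t ht <;>
    simp only [mul_one, mul_neg_one] at ht <;> omega

-- union of the four rays = all board cells on one of the two diagonals through (r, c)
lemma pvRayAll_mem (n r c : Int) (h0 : 0 ≤ r ∧ r < n ∧ 0 ≤ c ∧ c < n) (p : Nat) :
    p ∈ pvRayAll n r c ↔
      ∃ r' c', (0 ≤ r' ∧ r' < n ∧ 0 ≤ c' ∧ c' < n) ∧
        (r' + c' = r + c ∨ r' - c' = r - c) ∧ p = (r' * n + c').toNat := by
  have hmm := pvRay_mem n (-1) (-1) (Or.inr rfl) (Or.inr rfl) p n.toNat r c h0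
    (pvFuel_bound (Or.inr rfl) (Or.inr rfl) h0)
  have hmp := pvRay_mem n (-1) 1 (Or.inr rfl) (Or.inl rfl) p n.toNat r c h0
    (pvFuel_bound (Or.inr rfl) (Or.inl rfl) h0)
  have hpm := pvRay_mem n 1 (-1) (Or.inl rfl) (Or.inr rfl) p n.toNat r c h0
    (pvFuel_bound (Or.inl rfl) (Or.inr rfl) h0)
  have hpp := pvRay_mem n 1 1 (Or.inl rfl) (Or.inl rfl) p n.toNat r c h0
    (pvFuel_bound (Or.inl rfl) (Or.inl rfl) h0)
  simp only [pvRayAll, List.mem_append, hmm, hmp, hpm, hpp]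
  simp only [mul_one, mul_neg_one]
  constructor
  · rintro (((⟨t, ht, hp⟩ | ⟨t, ht, hp⟩) | ⟨t, ht, hp⟩) | ⟨t, ht, hp⟩)
    · exact ⟨r + -(t : Int), c + -(t : Int), ht, Or.inr (by ring), hp⟩
    · exact ⟨r + -(t : Int), c + (t : Int), ht, Or.inl (by ring), hp⟩
    · exact ⟨r + (t : Int), c + -(t : Int), ht, Or.inl (by ring), hp⟩
    · exact ⟨r + (t : Int), c + (t : Int), ht, Or.inr (by ring), hp⟩
  · rintro ⟨r', c', hr', hcond, hp⟩
    rcases hcond with hsum | hdiff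
    · by_cases hle : r ≤ r'
      · refine Or.inl (Or.inr ⟨(r' - r).toNat, ?_, ?_⟩) <;>
          · have e1 : r + ((r' - r).toNat : Int) = r' := by omega
            have e2 : c + -((r' - r).toNat : Int) = c' := by omega
            rw [e1, e2]
            assumption
      · refine Or.inl (Or.inl (Or.inr ⟨(r - r').toNat, ?_, ?_⟩)) <;>
          · have e1 : r + -((r - r').toNat : Int) = r' := by omega
            have e2 : c + ((r - r').toNat : Int) = c' := by omega
            rw [e1, e2]
            assumption
    · by_cases hle : r ≤ r'
      · refine Or.inr ⟨(r' - r).toNat, ?_, ?_⟩ <;>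
          · have e1 : r + ((r' - r).toNat : Int) = r' := by omega
            have e2 : c + ((r' - r).toNat : Int) = c' := by omega
            rw [e1, e2]
            assumption
      · refine Or.inl (Or.inl (Or.inl ⟨(r - r').toNat, ?_, ?_⟩)) <;>
          · have e1 : r + -((r - r').toNat : Int) = r' := by omega
            have e2 : c + -((r - r').toNat : Int) = c' := by omega
            rw [e1, e2]
            assumption

lemma pvCells_mem (n r c : Int) :
    (r, c) ∈ pvCells n ↔ (0 ≤ r ∧ r < n ∧ 0 ≤ c ∧ c < n) := by
  simp only [pvCells, List.mem_flatMap, List.mem_map, PySem.List.mem_pyRange_one]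
  constructor
  · rintro ⟨r', hr', c', hc', h⟩
    injection h with h1 h2
    subst h1; subst h2
    exact ⟨hr'.1, hr'.2, hc'.1, hc'.2⟩
  · rintro ⟨h1, h2, h3, h4⟩
    exact ⟨r, ⟨h1, h2⟩, c, ⟨h3, h4⟩, rfl⟩

-- getD of a dict built by an insert-or loop over l is the fold over the matching elements of l
lemma pvGetD_foldl_insert_bor {α : Type} (key val : α → Int) (l : List α)
    (d : PySem.Dict Int Int) (s : Int) :
    (l.foldl (fun d x => d.insert (key x) (PySem.Int.bor (d.getD (key x) 0) (val x))) d).getD s 0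
      = (l.filter (fun x => key x == s)).foldl (fun a x => PySem.Int.bor a (val x)) (d.getD s 0) := by
  induction l generalizing d with
  | nil => rfl
  | cons x t ih =>
      simp only [List.foldl_cons, List.filter_cons]
      by_cases h : key x = s
      · rw [ih]
        simp [h]
      · rw [ih, PySem.Dict.getD_insert, if_neg (fun hh : s = key x => h hh.symm)]
        simp [h]

lemma pvFoldl_prod {α β γ : Type} (f : β → α → β) (g : γ → α → γ) (l : List α) :
    ∀ (b : β) (c : γ),
      l.foldl (fun st x => (f st.1 x, g st.2 x)) (b, c) = (l.foldl f b, l.foldl g c) := by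
  induction l with
  | nil => intro b c; rfl
  | cons x t ih => intro b c; simpa using ih (f b x) (g c x)

lemma pvBuild_eq (n : Int) :
    pvBuild n = ((pvCells n).foldl
      (fun d rc => d.insert (rc.1 + rc.2)
        (PySem.Int.bor (d.getD (rc.1 + rc.2) 0) ((1 : Int) <<< ((rc.1 * n + rc.2).toNat))))
      PySem.Dict.empty,
      (pvCells n).foldl
      (fun d rc => d.insert (rc.1 - rc.2)
        (PySem.Int.bor (d.getD (rc.1 - rc.2) 0) ((1 : Int) <<< ((rc.1 * n + rc.2).toNat))))
      PySem.Dict.empty) := by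
  rw [pvBuild, pvCells]
  rw [← pvFoldl_prod]
  simp [List.foldl_flatMap, List.foldl_map]

-- the per-cell equality: A's four ray walks = B's two precomputed diagonal masks
lemma pvCell_eq (n r c : Int) (h0 : 0 ≤ r ∧ r < n ∧ 0 ≤ c ∧ c < n) :
    pvCellA n r c
      = PySem.Int.bor ((pvBuild n).1.getD (r + c) 0) ((pvBuild n).2.getD (r - c) 0) := by
  -- A side
  have hA : pvCellA n r c = ((pvOB (pvRayAll n r c) : Nat) : Int) := by
    simp only [pvCellA, List.foldl_cons, List.foldl_nil]
    rw [pvWalk_eq_ray, pvWalk_eq_ray, pvWalk_eq_ray, pvWalk_eq_ray]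
    rw [show (0 : Int) = ((0 : Nat) : Int) by simp]
    rw [pvFoldl_bor_shift (fun p : Nat => p), pvFoldl_bor_shift (fun p : Nat => p),
      pvFoldl_bor_shift (fun p : Nat => p), pvFoldl_bor_shift (fun p : Nat => p)]
    congr 1
    simp [pvRayAll, pvOB, List.foldl_append]
  -- B side
  have hD : (pvBuild n).1.getD (r + c) 0
      = ((pvOB (((pvCells n).filter (fun rc => rc.1 + rc.2 == r + c)).map
          (fun rc => (rc.1 * n + rc.2).toNat)) : Nat) : Int) := by
    rw [pvBuild_eq]
    dsimp only
    rw [pvGetD_foldl_insert_bor (fun rc : Int × Int => rc.1 + rc.2)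
      (fun rc : Int × Int => (1 : Int) <<< ((rc.1 * n + rc.2).toNat))]
    rw [PySem.Dict.getD_empty]
    rw [show (0 : Int) = ((0 : Nat) : Int) by simp]
    rw [pvFoldl_bor_shift (fun rc : Int × Int => (rc.1 * n + rc.2).toNat)]
    simp [pvOB, List.foldl_map]
  have hAnti : (pvBuild n).2.getD (r - c) 0
      = ((pvOB (((pvCells n).filter (fun rc => rc.1 - rc.2 == r - c)).map
          (fun rc => (rc.1 * n + rc.2).toNat)) : Nat) : Int) := by
    rw [pvBuild_eq]
    dsimp only
    rw [pvGetD_foldl_insert_bor (fun rc : Int × Int => rc.1 - rc.2)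
      (fun rc : Int × Int => (1 : Int) <<< ((rc.1 * n + rc.2).toNat))]
    rw [PySem.Dict.getD_empty]
    rw [show (0 : Int) = ((0 : Nat) : Int) by simp]
    rw [pvFoldl_bor_shift (fun rc : Int × Int => (rc.1 * n + rc.2).toNat)]
    simp [pvOB, List.foldl_map]
  rw [hA, hD, hAnti, PySem.Int.bor_natCast, ← pvOB_append]
  congr 1
  apply pvOB_ext
  intro p
  rw [pvRayAll_mem n r c h0 p]
  simp only [List.mem_append, List.mem_map, List.mem_filter, beq_iff_eq]
  constructor
  · rintro ⟨r', c', hr', hcond, rfl⟩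
    rcases hcond with hsum | hdiff
    · exact Or.inl ⟨(r', c'), ⟨(pvCells_mem n r' c').mpr hr', hsum⟩, rfl⟩
    · exact Or.inr ⟨(r', c'), ⟨(pvCells_mem n r' c').mpr hr', hdiff⟩, rfl⟩
  · rintro (⟨⟨r', c'⟩, ⟨hmem, hcond⟩, rfl⟩ | ⟨⟨r', c'⟩, ⟨hmem, hcond⟩, rfl⟩)
    · exact ⟨r', c', (pvCells_mem n r' c').mp hmem, Or.inl hcond, rfl⟩
    · exact ⟨r', c', (pvCells_mem n r' c').mp hmem, Or.inr hcond, rfl⟩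

-- ===== VERDICT (by name: the statement is the Claim_ definition above) =====
theorem get_attack_bitmasks_spec : Claim_equal_get_attack_bitmasks := by
  intro n _
  unfold Spec_get_attack_bitmasks get_attack_bitmasks get_attack_bitmasks_alt
  simp only [PySem.List.foldl_append_singleton_eq_map, PySem.List.foldl_append_eq_flatMap,
    List.nil_append]
  apply List.flatMap_congr
  intro row hrow
  apply List.map_congr_left
  intro col hcol
  rw [PySem.List.mem_pyRange_one] at hrow hcol
  exact pvCell_eq n row col ⟨hrow.1, hrow.2, hcol.1, hcol.2⟩
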